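-- pv_equiv track=rewrite | github.com/sai-pher/NLP_2018_sai-pher | test/puzzle.py | word_find_diagonal1
-- ===== SOURCE A (Python) =====
-- def match_string(text, pattern):
--     """
--
--     :param text: text array of len n
--     :param pattern: pattern array of len m
--     :return: boolean
--     """
--     n = len(text)
--     m = len(pattern)
--     for i in range(0, (n - m) + 1):
--         j = 0
--         while j < m and pattern[j] == text[i + j]:
--             j = j + 1
--         if j == m:
--             return i
--     return -1
--
-- def word_find_diagonal1(puzzle, word):
--     """
--
--     :param puzzle: 2D array of text
--     :param words: 1D array of words to find
--     :return: ??
--     """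
--     results_tl_br = []  # Array of results when searching from top left to bottom right
--     results_br_tl = []  # Array of results when searching from bottom right to top left
--     rowLength = len(puzzle[0][0])
--
--     n = rowLength
--
--     for i in range(n):
--         rowString = ""
--         for j in range((n - i)):
--             rowString += puzzle[j + i][0][j]
--         results_tl_br.append(match_string(rowString, word))
--         results_br_tl.append(match_string(rowString[::-1], word))
--
--     for i in range(n, 0, -1):
--         rowString = ""
--         for j in range((n - i)):
--             rowString += puzzle[j][0][j + i]
--
--         results_tl_br.append(match_string(rowString, word))
--         results_br_tl.append(match_string(rowString[::-1], word))
--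
--     return results_tl_br, [i if i is -1 else len(puzzle[0][0]) - 1 - i for i in results_br_tl]
-- ===== SOURCE B (Python) =====
-- def word_find_diagonal1(puzzle, word):
--     """Bucket the grid's chars by diagonal in one row-major pass, then search each
--     bucket once with str.find / str.rfind (reversed word) instead of building each
--     diagonal separately and scanning it with a hand-rolled matcher."""
--     n = len(puzzle[0][0])
--     buckets = [[] for _ in range(2 * n)]
--     for r in range(n):
--         row = puzzle[r][0]
--         for c in range(n):
--             buckets[(r - c) % (2 * n)].append(row[c])
--     rev_word = word[::-1]
--     m = len(word)
--     results_tl_br = []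
--     results_br_tl = []
--     for cells in buckets:
--         d = "".join(cells)
--         results_tl_br.append(d.find(word))
--         q = d.rfind(rev_word)
--         results_br_tl.append(-1 if q == -1 else n - 1 - (len(d) - m - q))
--     return results_tl_br, results_br_tl
-- ===== Notes on version B (the rewrite author's own statement) =====
-- stated objective: alternative
-- what changed: B replaces A's per-diagonal nested loops and hand-rolled naive matcher by one row-major pass that distributes every grid character into a diagonal bucket indexed by (r-c) mod 2n, then searches each bucket once with str.find and, for the backward direction, str.rfind of the reversed word (last occurrence) instead of A's reversing each diagonal and re-scanning it.
import Mathlib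
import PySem

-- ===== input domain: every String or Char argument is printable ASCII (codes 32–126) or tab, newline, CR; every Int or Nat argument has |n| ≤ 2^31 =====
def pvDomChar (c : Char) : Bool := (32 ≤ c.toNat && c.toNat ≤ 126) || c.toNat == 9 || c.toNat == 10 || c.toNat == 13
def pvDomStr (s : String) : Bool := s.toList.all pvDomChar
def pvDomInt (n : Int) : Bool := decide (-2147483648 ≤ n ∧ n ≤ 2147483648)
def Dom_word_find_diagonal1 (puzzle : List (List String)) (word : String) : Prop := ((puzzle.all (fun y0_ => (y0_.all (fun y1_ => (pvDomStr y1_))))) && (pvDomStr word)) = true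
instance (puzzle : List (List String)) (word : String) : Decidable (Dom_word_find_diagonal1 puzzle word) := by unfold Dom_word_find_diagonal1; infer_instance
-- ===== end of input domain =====

-- B buckets the grid's characters by diagonal in one row-major pass and searches each
-- bucket with find / rfind of the reversed word, instead of A's per-diagonal building
-- loops and hand-rolled scan matcher (objective: alternative).

-- shared cell accessor: puzzle[r][0][c]; in-range under Pre_, so the defaults are never used
def pvCell (puzzle : List (List String)) (r c : Nat) : Char :=
  (((puzzle.getD r []).getD 0 "").toList).getD c ' '

-- ===== PORT A =====
-- while j < m and pattern[j] == text[i + j]: j = j + 1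
def msWhile (text pattern : List Char) (i m j : Nat) : Nat :=
  if j < m ∧ pattern.getD j ' ' = text.getD (i + j) ' ' then msWhile text pattern i m (j + 1) else j
termination_by m - j
decreasing_by omega

-- for i in range(0, (n-m)+1): …; early return i when j == m; else -1
def msOuter (text pattern : List Char) (m : Nat) : List Int → Int
  | [] => -1
  | i :: rest => if msWhile text pattern i.toNat m 0 = m then i else msOuter text pattern m rest

def match_string (text pattern : List Char) : Int :=
  msOuter text pattern pattern.length
    (PySem.List.pyRange 0 ((text.length : Int) - (pattern.length : Int) + 1) 1)

-- rowString built by += over j in range(n-i): puzzle[j+i][0][j]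
def rowStr1 (puzzle : List (List String)) (i n : Nat) : List Char :=
  (List.range (n - i)).foldl (fun s j => s ++ [pvCell puzzle (j + i) j]) []

-- rowString built by += over j in range(n-i): puzzle[j][0][j+i]
def rowStr2 (puzzle : List (List String)) (i n : Nat) : List Char :=
  (List.range (n - i)).foldl (fun s j => s ++ [pvCell puzzle j (j + i)]) []

def word_find_diagonal1 (puzzle : List (List String)) (word : String) : List Int × List Int :=
  let n := ((puzzle.getD 0 []).getD 0 "").toList.length
  let w := word.toList
  let s1 := (List.range n).foldl
    (fun (acc : List Int × List Int) i =>
      (acc.1 ++ [match_string (rowStr1 puzzle i n) w],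
       acc.2 ++ [match_string (rowStr1 puzzle i n).reverse w])) ([], [])
  let s2 := (PySem.List.pyRange (n : Int) 0 (-1)).foldl
    (fun (acc : List Int × List Int) i =>
      (acc.1 ++ [match_string (rowStr2 puzzle i.toNat n) w],
       acc.2 ++ [match_string (rowStr2 puzzle i.toNat n).reverse w])) s1
  (s2.1, s2.2.map (fun i => if i = -1 then i else (n : Int) - 1 - i))

-- ===== PORT B =====
-- bucket index (r - c) % (2*n), Python's floored %
def pvKey (n r c : Nat) : Nat := (PySem.Int.mod ((r : Int) - (c : Int)) (2 * (n : Int))).toNat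

def word_find_diagonal1_alt (puzzle : List (List String)) (word : String) : List Int × List Int :=
  let n := ((puzzle.getD 0 []).getD 0 "").toList.length
  -- buckets = [[] for _ in range(2*n)]; one row-major pass appending row[c] to bucket (r-c) % (2*n)
  let buckets := (List.range n).foldl
    (fun (b : List (List Char)) r =>
      let row := ((puzzle.getD r []).getD 0 "").toList
      (List.range n).foldl
        (fun (b : List (List Char)) c =>
          b.set (pvKey n r c) (b.getD (pvKey n r c) [] ++ [row.getD c ' '])) b)
    (List.replicate (2 * n) [])
  let w := word.toList
  let rw := w.reverse
  let m := w.length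
  -- each bucket holds one char per append, so Python's "".join(cells) is the bucket itself
  buckets.foldl
    (fun (acc : List Int × List Int) cells =>
      let q := PySem.Chars.rfind cells rw
      (acc.1 ++ [PySem.Chars.find cells w],
       acc.2 ++ [if q = -1 then (-1 : Int) else (n : Int) - 1 - ((cells.length : Int) - (m : Int) - q)]))
    ([], [])

-- ===== PRECONDITION & SPEC =====
-- Pre_: exactly the inputs A accepts — a nonempty first row whose string (length n) fits:
-- the first n rows exist, are nonempty, and their strings have length ≥ n (else Python IndexError).
def Pre_word_find_diagonal1 (puzzle : List (List String)) (word : String) : Prop :=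
  puzzle ≠ [] ∧ puzzle.getD 0 [] ≠ [] ∧
  ∀ r < ((puzzle.getD 0 []).getD 0 "").toList.length,
    puzzle.getD r [] ≠ [] ∧
    ((puzzle.getD 0 []).getD 0 "").toList.length ≤ ((puzzle.getD r []).getD 0 "").toList.length
instance (puzzle : List (List String)) (word : String) : Decidable (Pre_word_find_diagonal1 puzzle word) := by
  unfold Pre_word_find_diagonal1; infer_instance

def pvWitness_word_find_diagonal1 : List (List String) × String := ([["ab"], ["cd"]], "a")

def Spec_word_find_diagonal1 (puzzle : List (List String)) (word : String) (out : List Int × List Int) : Prop := out = word_find_diagonal1_alt puzzle word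
instance (puzzle : List (List String)) (word : String) (out : List Int × List Int) : Decidable (Spec_word_find_diagonal1 puzzle word out) := by unfold Spec_word_find_diagonal1; infer_instance

-- ===== CLAIM (what is proved, stated in full; the proofs are below) =====
def Claim_equal_word_find_diagonal1 : Prop := ∀ (puzzle : List (List String)) (word : String), Dom_word_find_diagonal1 puzzle word → Pre_word_find_diagonal1 puzzle word → Spec_word_find_diagonal1 puzzle word (word_find_diagonal1 puzzle word)

-- ===== LEMMAS AND PROOFS =====

-- the two diagonal families (as char lists)
def dCells (puzzle : List (List String)) (n i : Nat) : List Char :=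
  (List.range (n - i)).map (fun j => pvCell puzzle (j + i) j)
def uCells (puzzle : List (List String)) (n i : Nat) : List Char :=
  (List.range (n - i)).map (fun j => pvCell puzzle j (j + i))
def diagOf (puzzle : List (List String)) (n idx : Nat) : List Char :=
  if idx < n then dCells puzzle n idx else uCells puzzle n (2 * n - idx)

-- ---------- A-side: the naive matcher is Chars.find ----------

theorem msWhile_run (text pattern : List Char) (i m : Nat) :
    ∀ fuel j, m - j ≤ fuel → j ≤ m →
      (msWhile text pattern i m j = m ↔
        ∀ t, j ≤ t → t < m → pattern.getD t ' ' = text.getD (i + t) ' ') := by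
  intro fuel
  induction fuel with
  | zero =>
    intro j hf hj
    have hjm : j = m := by omega
    rw [msWhile]
    simp only [hjm]
    constructor
    · intro _ t ht htm; omega
    · intro _; rw [if_neg]; intro hc; omega
  | succ fuel ih =>
    intro j hf hj
    rw [msWhile]
    by_cases hc : j < m ∧ pattern.getD j ' ' = text.getD (i + j) ' '
    · rw [if_pos hc]
      rw [ih (j + 1) (by omega) (by omega)]
      constructor
      · intro h t ht htm
        rcases Nat.eq_or_lt_of_le ht with h1 | h1
        · exact h1 ▸ hc.2
        · exact h t h1 htm
      · intro h t ht htm; exact h t (by omega) htm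
    · rw [if_neg hc]
      rcases Nat.eq_or_lt_of_le hj with h1 | h1
      · subst h1
        constructor
        · intro _ t ht htm; omega
        · intro _; rfl
      · constructor
        · intro h; omega
        · intro h
          exact absurd ⟨h1, h j le_rfl h1⟩ hc

theorem msOuter_append_skip (text pattern : List Char) (m : Nat) (l1 l2 : List Int)
    (h : ∀ x ∈ l1, msWhile text pattern x.toNat m 0 ≠ m) :
    msOuter text pattern m (l1 ++ l2) = msOuter text pattern m l2 := by
  induction l1 with
  | nil => rfl
  | cons x xs ih =>
    simp only [List.cons_append, msOuter, if_neg (h x (by simp))]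
    exact ih (fun y hy => h y (by simp [hy]))

theorem msOuter_neg (text pattern : List Char) (m : Nat) (l : List Int)
    (h : ∀ x ∈ l, msWhile text pattern x.toNat m 0 ≠ m) :
    msOuter text pattern m l = -1 := by
  have := msOuter_append_skip text pattern m l [] h
  simpa using this

theorem match_iff_prefix (text pattern : List Char) (i : Nat)
    (hfit : i + pattern.length ≤ text.length) :
    (∀ t, 0 ≤ t → t < pattern.length → pattern.getD t ' ' = text.getD (i + t) ' ')
      ↔ pattern <+: text.drop i := by
  constructor
  · intro h
    have hlen : pattern.length ≤ (text.drop i).length := by simp; omega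
    have : pattern = (text.drop i).take pattern.length := by
      apply List.ext_getElem (by simp; omega)
      intro k h1 h2
      have hk : k < pattern.length := h1
      have hik : i + k < text.length := by omega
      have := h k (Nat.zero_le _) hk
      rw [List.getD_eq_getElem _ _ hk, List.getD_eq_getElem _ _ hik] at this
      simpa [List.getElem_take, List.getElem_drop] using this
    rw [this]
    exact List.take_prefix _ _
  · intro h t _ htm
    have h2 : t < (text.drop i).length := by simp; omega
    have := h.getElem htm
    rw [List.getD_eq_getElem _ _ htm, List.getD_eq_getElem _ _ (show i + t < text.length by omega)]
    simpa [List.getElem_drop] using this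

theorem match_string_eq_find (text pattern : List Char) :
    match_string text pattern = PySem.Chars.find text pattern := by
  have bridge : ∀ i : Nat, i + pattern.length ≤ text.length →
      (msWhile text pattern i pattern.length 0 = pattern.length ↔ pattern <+: text.drop i) := by
    intro i hi
    rw [msWhile_run text pattern i pattern.length pattern.length 0 (by omega) (by omega)]
    simpa using match_iff_prefix text pattern i hi
  by_cases hmn : pattern.length ≤ text.length
  · have hcast : ((text.length : Int) - (pattern.length : Int) + 1)
        = ((text.length - pattern.length + 1 : Nat) : Int) := by omega
    unfold match_string
    rw [hcast, PySem.List.pyRange_zero_natCast]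
    by_cases hinf : pattern <:+: text
    · have hf : 0 ≤ PySem.Chars.find text pattern := (PySem.Chars.find_nonneg_iff _ _).2 hinf
      obtain ⟨hpre, hmin⟩ := PySem.Chars.find_spec hf
      have hkn : ((PySem.Chars.find text pattern).toNat : Int) = PySem.Chars.find text pattern :=
        Int.toNat_of_nonneg hf
      have hkle : (PySem.Chars.find text pattern).toNat ≤ text.length := by
        have := PySem.Chars.find_le_length text pattern
        omega
      have hkm : (PySem.Chars.find text pattern).toNat + pattern.length ≤ text.length := by
        have := hpre.length_le
        simp at this
        omega
      have hsplit : List.range (text.length - pattern.length + 1)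
          = List.range (PySem.Chars.find text pattern).toNat
            ++ List.range' (PySem.Chars.find text pattern).toNat
                 (text.length - pattern.length + 1 - (PySem.Chars.find text pattern).toNat) := by
        have h1 : text.length - pattern.length + 1
            = (PySem.Chars.find text pattern).toNat
              + (text.length - pattern.length + 1 - (PySem.Chars.find text pattern).toNat) := by
          omega
        rw [List.range_eq_range', h1, ← List.range'_append (s := 0) (step := 1)]
        simp [List.range_eq_range']
      rw [hsplit, List.map_append, msOuter_append_skip]
      · have hpos : text.length - pattern.length + 1 - (PySem.Chars.find text pattern).toNat
            = (text.length - pattern.length - (PySem.Chars.find text pattern).toNat) + 1 := by omega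
        rw [hpos, List.range'_succ, List.map_cons, msOuter]
        simp only [Int.toNat_natCast]
        rw [if_pos ((bridge _ hkm).2 hpre)]
        exact hkn
      · intro x hx
        simp only [List.mem_map, List.mem_range] at hx
        obtain ⟨a, ha, rfl⟩ := hx
        simp only [Int.toNat_natCast]
        intro hEq
        exact hmin a (by omega) ((bridge a (by omega)).1 hEq)
    · rw [(PySem.Chars.find_eq_neg_one_iff _ _).2 hinf]
      apply msOuter_neg
      intro x hx
      simp only [List.mem_map, List.mem_range] at hx
      obtain ⟨a, ha, rfl⟩ := hx
      simp only [Int.toNat_natCast]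
      intro hEq
      exact hinf (((bridge a (by omega)).1 hEq).isInfix.trans (text.drop_suffix a).isInfix)
  · unfold match_string
    rw [PySem.List.pyRange_one_eq_nil (by omega)]
    have hni : ¬ pattern <:+: text := by
      intro h
      have := h.length_le
      omega
    rw [(PySem.Chars.find_eq_neg_one_iff _ _).2 hni]
    rfl

theorem foldl_pair_append {α : Type} (f h : α → Int) (l : List α) (a b : List Int) :
    l.foldl (fun (acc : List Int × List Int) i => (acc.1 ++ [f i], acc.2 ++ [h i])) (a, b)
      = (a ++ l.map f, b ++ l.map h) := by
  induction l generalizing a b with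
  | nil => simp
  | cons x xs ih => simp [ih]

theorem rowStr1_eq (puzzle : List (List String)) (i n : Nat) :
    rowStr1 puzzle i n = dCells puzzle n i := by
  unfold rowStr1 dCells
  rw [PySem.List.foldl_append_singleton_eq_map]
  rfl

theorem rowStr2_eq (puzzle : List (List String)) (i n : Nat) :
    rowStr2 puzzle i n = uCells puzzle n i := by
  unfold rowStr2 uCells
  rw [PySem.List.foldl_append_singleton_eq_map]
  rfl

-- ---------- B-side: rfind of the reversed word ----------


theorem rfind_go_neg (s sub : List Char) (k : Nat)
    (h : ∀ j ≤ k, ¬ sub <+: s.drop j) : PySem.Chars.rfind.go s sub k = -1 := by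
  induction k with
  | zero =>
    rw [PySem.Chars.rfind.go, if_neg]
    simp only [List.isPrefixOf_iff_prefix]
    simpa using h 0 le_rfl
  | succ k ih =>
    rw [PySem.Chars.rfind.go, if_neg]
    · exact ih (fun j hj => h j (by omega))
    · simp only [List.isPrefixOf_iff_prefix]
      exact h (k + 1) le_rfl

theorem rfind_go_pos (s sub : List Char) (k j0 : Nat) (hj0 : j0 ≤ k)
    (hp : sub <+: s.drop j0) (hmax : ∀ j, j0 < j → j ≤ k → ¬ sub <+: s.drop j) :
    PySem.Chars.rfind.go s sub k = j0 := by
  induction k with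
  | zero =>
    have h0 : j0 = 0 := by omega
    subst h0
    rw [PySem.Chars.rfind.go,
      if_pos (by simp only [List.isPrefixOf_iff_prefix]; simpa using hp)]
    simp
  | succ k ih =>
    rw [PySem.Chars.rfind.go]
    by_cases h : j0 = k + 1
    · subst h
      rw [if_pos (by simp only [List.isPrefixOf_iff_prefix]; exact hp)]
    · rw [if_neg]
      · exact ih (by omega) (fun j h1 h2 => hmax j h1 (by omega))
      · simp only [List.isPrefixOf_iff_prefix]
        exact hmax (k + 1) (by omega) le_rfl

theorem prefix_rev_iff (d w : List Char) (j : Nat) (h : j + w.length ≤ d.length) :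
    (w.reverse <+: d.drop j ↔ w <+: d.reverse.drop (d.length - w.length - j)) := by
  have h1 : d.reverse.drop (d.length - w.length - j) = (d.take (j + w.length)).reverse := by
    rw [List.drop_reverse]
    have e : d.length - (d.length - w.length - j) = j + w.length := by omega
    rw [e]
  have h2 : (d.take (j + w.length)).reverse.take w.length
      = ((d.drop j).take w.length).reverse := by
    rw [List.take_reverse, List.length_take]
    have e1 : min (j + w.length) d.length - w.length = j := by omega
    rw [e1]
    congr 1
    rw [List.drop_take]
    have e2 : j + w.length - j = w.length := by omega
    rw [e2]
  have key : (d.reverse.drop (d.length - w.length - j)).take w.length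
      = ((d.drop j).take w.length).reverse := by rw [h1, h2]
  constructor
  · intro hh
    have e := List.prefix_iff_eq_take.1 hh
    rw [List.length_reverse] at e
    have e2 : w = List.take w.length (List.drop (d.length - w.length - j) d.reverse) := by
      rw [key, ← e, List.reverse_reverse]
    have tp := List.take_prefix w.length (List.drop (d.length - w.length - j) d.reverse)
    rw [← e2] at tp
    exact tp
  · intro hh
    have e := List.prefix_iff_eq_take.1 hh
    rw [key] at e
    have e2 : w.reverse = List.take w.length (List.drop j d) := by
      have e3 := congrArg List.reverse e
      rwa [List.reverse_reverse] at e3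
    have tp := List.take_prefix w.length (List.drop j d)
    rw [← e2] at tp
    exact tp

theorem rfind_rev (d w : List Char) :
    PySem.Chars.rfind d w.reverse =
      if PySem.Chars.find d.reverse w = -1 then -1
      else (d.length : Int) - (w.length : Int) - PySem.Chars.find d.reverse w := by
  by_cases hinf : w <:+: d.reverse
  · have hf : 0 ≤ PySem.Chars.find d.reverse w := (PySem.Chars.find_nonneg_iff _ _).2 hinf
    obtain ⟨hpre, hmin⟩ := PySem.Chars.find_spec hf
    have hle : PySem.Chars.find d.reverse w ≤ d.reverse.length :=
      PySem.Chars.find_le_length _ _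
    set p := (PySem.Chars.find d.reverse w).toNat with hpdef
    have hkn : ((p : Nat) : Int) = PySem.Chars.find d.reverse w := Int.toNat_of_nonneg hf
    have hpd : p ≤ d.length := by simp at hle; omega
    have hpm : p + w.length ≤ d.length := by
      have := hpre.length_le
      simp at this
      omega
    rw [if_neg (by omega)]
    set j0 := d.length - w.length - p with hj0def
    have hj0 : j0 + w.length ≤ d.length := by omega
    have hpj : d.length - w.length - j0 = p := by omega
    have hp0 : w.reverse <+: d.drop j0 := by
      rw [prefix_rev_iff d w j0 hj0, hpj]
      exact hpre
    have hgo : PySem.Chars.rfind.go d w.reverse d.length = j0 := by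
      apply rfind_go_pos d w.reverse d.length j0 (by omega) hp0
      intro j h1 h2 hcon
      have hjm : j + w.length ≤ d.length := by
        have := hcon.length_le
        simp at this
        omega
      rw [prefix_rev_iff d w j hjm] at hcon
      exact hmin (d.length - w.length - j) (by omega) hcon
    show PySem.Chars.rfind.go d w.reverse d.length = _
    rw [hgo]
    omega
  · rw [if_pos ((PySem.Chars.find_eq_neg_one_iff _ _).2 hinf)]
    apply rfind_go_neg
    intro j _ hcon
    apply hinf
    have h1 : w.reverse <:+: d := hcon.isInfix.trans (d.drop_suffix j).isInfix
    have := List.reverse_infix.2 h1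
    rwa [List.reverse_reverse] at this

-- ---------- B-side: the bucket pass produces the diagonals ----------

def pvPairs (n : Nat) : List (Nat × Nat) :=
  (List.range n).flatMap (fun r => (List.range n).map (Prod.mk r))

theorem flatMap_singleton_map {α β : Type} (f : α → β) (l : List α) :
    l.flatMap (fun j => [f j]) = l.map f := by
  induction l with
  | nil => rfl
  | cons a t ih => simp only [List.flatMap_cons, List.map_cons, ih, List.singleton_append]

theorem foldl_set_length {α : Type} (f : α → Nat) (g : α → Char) (P : List α)
    (b : List (List Char)) :
    (P.foldl (fun b x => b.set (f x) (b.getD (f x) [] ++ [g x])) b).length = b.length := by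
  induction P generalizing b with
  | nil => rfl
  | cons x rest ih =>
    rw [List.foldl_cons, ih, List.length_set]

theorem foldl_set_getD {α : Type} (f : α → Nat) (g : α → Char) (P : List α)
    (b : List (List Char)) (hf : ∀ x ∈ P, f x < b.length) (idx : Nat) :
    (P.foldl (fun b x => b.set (f x) (b.getD (f x) [] ++ [g x])) b).getD idx []
      = b.getD idx [] ++ (P.filter (fun x => f x = idx)).map g := by
  induction P generalizing b with
  | nil => simp
  | cons x rest ih =>
    simp only [List.foldl_cons, List.filter_cons]
    rw [ih _ (by intro y hy; rw [List.length_set]; exact hf y (List.mem_cons_of_mem x hy))]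
    by_cases h : f x = idx
    · subst h
      simp only [decide_true, if_pos]
      rw [List.getD_eq_getElem?_getD (l := b.set (f x) _),
        List.getElem?_set_self (hf x List.mem_cons_self)]
      simp [List.getD_eq_getElem?_getD]
    · have hd : (decide (f x = idx)) = false := by simp [h]
      simp only [hd, Bool.false_eq_true, if_neg, not_false_iff]
      rw [List.getD_eq_getElem?_getD (l := b.set (f x) _), List.getElem?_set_ne h,
        ← List.getD_eq_getElem?_getD]

theorem pvKey_le (n r c : Nat) (hr : r < n) (hc : c < n) :
    pvKey n r c = if c ≤ r then r - c else 2 * n - (c - r) := by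
  unfold pvKey PySem.Int.mod
  have h2n : (0 : Int) ≤ 2 * (n : Int) := by positivity
  rw [Int.fmod_eq_emod, if_pos (Or.inl h2n), add_zero]
  have hmod : ((r : Int) - (c : Int)) % (2 * (n : Int))
      = if c ≤ r then ((r - c : Nat) : Int) else ((2 * n - (c - r) : Nat) : Int) := by
    split_ifs with h
    · rw [Int.emod_eq_of_lt] <;> omega
    · have e : ((r : Int) - (c : Int)) % (2 * (n : Int))
          = ((r : Int) - (c : Int) + 2 * (n : Int) * 1) % (2 * (n : Int)) := by
        rw [Int.add_mul_emod_self_left]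
      rw [e, Int.emod_eq_of_lt] <;> omega
  rw [hmod]
  split_ifs <;> simp

theorem range_filter_single (n c0 : Nat) (hc0 : c0 < n) (p : Nat → Bool)
    (hp : ∀ c < n, p c = decide (c = c0)) : (List.range n).filter p = [c0] := by
  induction n with
  | zero => omega
  | succ n ih =>
    rw [List.range_succ, List.filter_append]
    by_cases h : c0 = n
    · subst h
      have h1 : (List.range c0).filter p = [] := by
        apply List.filter_eq_nil_iff.2
        intro a ha
        rw [hp a (by simp at ha; omega)]
        simp at ha ⊢
        omega
      have h2 : p c0 = true := by rw [hp c0 (by omega)]; simp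
      simp [h1, h2]
    · rw [ih (by omega) (fun c hc => hp c (by omega))]
      have h2 : p n = false := by rw [hp n (by omega)]; simp; omega
      simp [h2]

theorem range_filter_none (n : Nat) (p : Nat → Bool)
    (hp : ∀ c < n, p c = false) : (List.range n).filter p = [] := by
  apply List.filter_eq_nil_iff.2
  intro a ha
  simp [hp a (by simpa using ha)]

theorem pairs_filter_eq (puzzle : List (List String)) (n idx : Nat) (hidx : idx < 2 * n) :
    ((pvPairs n).filter (fun x => pvKey n x.1 x.2 = idx)).map
        (fun x => pvCell puzzle x.1 x.2)
      = diagOf puzzle n idx := by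
  unfold pvPairs
  rw [List.filter_flatMap]
  have hrow : ∀ r < n, ((List.range n).map (Prod.mk r)).filter
      (fun x => pvKey n x.1 x.2 = idx)
      = if idx < n then (if idx ≤ r then [(r, r - idx)] else [])
        else (if r < idx - n then [(r, r + (2 * n - idx))] else []) := by
    intro r hr
    rw [List.filter_map]
    by_cases h1 : idx < n
    · rw [if_pos h1]
      split_ifs with h
      · rw [range_filter_single n (r - idx) (by omega)]
        · simp
        · intro c hc
          simp only [Function.comp_apply]
          rw [pvKey_le n r c hr hc]
          split_ifs with h2 <;> simp <;> omega
      · rw [range_filter_none]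
        · simp
        · intro c hc
          simp only [Function.comp_apply]
          rw [pvKey_le n r c hr hc]
          split_ifs with h2 <;> simp <;> omega
    · rw [if_neg h1]
      split_ifs with h
      · rw [range_filter_single n (r + (2 * n - idx)) (by omega)]
        · simp
        · intro c hc
          simp only [Function.comp_apply]
          rw [pvKey_le n r c hr hc]
          split_ifs with h2 <;> simp <;> omega
      · rw [range_filter_none]
        · simp
        · intro c hc
          simp only [Function.comp_apply]
          rw [pvKey_le n r c hr hc]
          split_ifs with h2 <;> simp <;> omega
  rw [List.flatMap_congr (fun r hr => hrow r (by simpa using hr))]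
  by_cases h1 : idx < n
  · simp only [if_pos h1]
    unfold diagOf dCells
    rw [if_pos h1]
    have hsplit : List.range n = List.range idx ++ (List.range (n - idx)).map (fun j => idx + j) := by
      rw [← List.range_add]
      congr 1
      omega
    rw [hsplit, List.flatMap_append, List.flatMap_map]
    have e1 : (List.range idx).flatMap
        (fun r => if idx ≤ r then [(r, r - idx)] else []) = [] := by
      apply List.flatMap_eq_nil_iff.2
      intro r hr
      rw [if_neg (by simp at hr; omega)]
    rw [e1, List.nil_append]
    have e2 : ∀ j ∈ List.range (n - idx),
        (if idx ≤ idx + j then [(idx + j, idx + j - idx)] else []) = [(idx + j, j)] := by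
      intro j hj
      rw [if_pos (by omega)]
      congr 2
      omega
    rw [List.flatMap_congr e2]
    have e3 : (List.range (n - idx)).flatMap (fun j => [(idx + j, j)])
        = (List.range (n - idx)).map (fun j => (idx + j, j)) :=
      flatMap_singleton_map _ _
    rw [e3, List.map_map]
    apply List.map_congr_left
    intro j hj
    simp only [Function.comp_apply]
    congr 1
    omega
  · simp only [if_neg h1]
    unfold diagOf uCells
    rw [if_neg h1]
    have hsplit : List.range n
        = List.range (idx - n) ++ (List.range (n - (idx - n))).map (fun j => (idx - n) + j) := by
      rw [← List.range_add]
      congr 1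
      omega
    rw [hsplit, List.flatMap_append, List.flatMap_map]
    have e1 : (List.range (n - (idx - n))).flatMap
        (fun j => if (idx - n) + j < idx - n then [((idx - n) + j, (idx - n) + j + (2 * n - idx))] else []) = [] := by
      apply List.flatMap_eq_nil_iff.2
      intro j hj
      rw [if_neg (by omega)]
    rw [e1, List.append_nil]
    have e2 : ∀ r ∈ List.range (idx - n),
        (if r < idx - n then [(r, r + (2 * n - idx))] else []) = [(r, r + (2 * n - idx))] := by
      intro r hr
      rw [if_pos (by simpa using hr)]
    rw [List.flatMap_congr e2]
    have e3 : (List.range (idx - n)).flatMap (fun r => [(r, r + (2 * n - idx))])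
        = (List.range (idx - n)).map (fun r => (r, r + (2 * n - idx))) :=
      flatMap_singleton_map _ _
    rw [e3, List.map_map]
    have e4 : n - (2 * n - idx) = idx - n := by omega
    rw [e4]
    apply List.map_congr_left
    intro j hj
    simp only [Function.comp_apply]

theorem mem_pvPairs {n : Nat} {x : Nat × Nat} (h : x ∈ pvPairs n) : x.1 < n ∧ x.2 < n := by
  unfold pvPairs at h
  simp only [List.mem_flatMap, List.mem_map, List.mem_range] at h
  obtain ⟨r, hr, c, hc, rfl⟩ := h
  exact ⟨hr, hc⟩

theorem buckets_eq (puzzle : List (List String)) (n : Nat) :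
    ((List.range n).foldl
      (fun (b : List (List Char)) r =>
        (List.range n).foldl
          (fun (b : List (List Char)) c =>
            b.set (pvKey n r c) (b.getD (pvKey n r c) []
              ++ [(((puzzle.getD r []).getD 0 "").toList).getD c ' '])) b)
      (List.replicate (2 * n) []))
      = (List.range (2 * n)).map (diagOf puzzle n) := by
  have hnest : ((List.range n).foldl
      (fun (b : List (List Char)) r =>
        (List.range n).foldl
          (fun (b : List (List Char)) c =>
            b.set (pvKey n r c) (b.getD (pvKey n r c) []
              ++ [(((puzzle.getD r []).getD 0 "").toList).getD c ' '])) b)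
      (List.replicate (2 * n) []))
      = (pvPairs n).foldl
          (fun (b : List (List Char)) x =>
            b.set (pvKey n x.1 x.2) (b.getD (pvKey n x.1 x.2) [] ++ [pvCell puzzle x.1 x.2]))
          (List.replicate (2 * n) []) := by
    unfold pvPairs
    rw [List.foldl_flatMap]
    congr 1
    funext b r
    rw [List.foldl_map]
    rfl
  rw [hnest]
  have hf : ∀ x ∈ pvPairs n, pvKey n x.1 x.2 < (List.replicate (2 * n) ([] : List Char)).length := by
    intro x hx
    obtain ⟨h1, h2⟩ := mem_pvPairs hx
    rw [List.length_replicate, pvKey_le n x.1 x.2 h1 h2]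
    split_ifs <;> omega
  apply List.ext_getElem
  · rw [foldl_set_length, List.length_replicate, List.length_map, List.length_range]
  · intro i hi1 hi2
    have hi2n : i < 2 * n := by
      rw [foldl_set_length, List.length_replicate] at hi1
      exact hi1
    have hgetD := foldl_set_getD (fun x => pvKey n x.1 x.2) (fun x => pvCell puzzle x.1 x.2)
      (pvPairs n) (List.replicate (2 * n) []) hf i
    rw [List.getD_eq_getElem _ _ hi1] at hgetD
    rw [hgetD, List.getD_replicate, List.nil_append, List.getElem_map, List.getElem_range]
    · exact pairs_filter_eq puzzle n i hi2n
    · exact hi2n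

-- list(range(n, 0, -1)) = [n, n-1, …, 1]
theorem pyRange_down (n : Nat) : PySem.List.pyRange (n : Int) 0 (-1)
    = (List.range n).map (fun k : Nat => (n : Int) - (k : Int)) := by
  unfold PySem.List.pyRange
  rw [if_neg (by norm_num)]
  by_cases h : (0 : Int) < (n : Int)
  · rw [if_neg (by norm_num), if_pos h]
    have e : (((n : Int) - 0 + -(-1) - 1) / -(-1)).toNat = n := by
      norm_num
    rw [e]
    refine List.map_congr_left fun k hk => ?_
    ring
  · have hn : n = 0 := by omega
    subst hn
    norm_num

theorem find_add_len_le (s sub : List Char) (h : 0 ≤ PySem.Chars.find s sub) :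
    PySem.Chars.find s sub + (sub.length : Int) ≤ (s.length : Int) := by
  obtain ⟨hpre, -⟩ := PySem.Chars.find_spec h
  have h1 := hpre.length_le
  have h2 := PySem.Chars.find_le_length s sub
  simp only [List.length_drop] at h1
  omega

-- B's per-bucket backward value equals A's reverse-find remap
theorem rfind_rev' (n : Nat) (d w : List Char) :
    (if PySem.Chars.rfind d w.reverse = -1 then (-1 : Int)
     else (n : Int) - 1 - ((d.length : Int) - (w.length : Int) - PySem.Chars.rfind d w.reverse))
    = (if PySem.Chars.find d.reverse w = -1 then PySem.Chars.find d.reverse w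
       else (n : Int) - 1 - PySem.Chars.find d.reverse w) := by
  rw [rfind_rev]
  by_cases h : PySem.Chars.find d.reverse w = -1
  · simp [h]
  · have h0 : 0 ≤ PySem.Chars.find d.reverse w := by
      have := PySem.Chars.neg_one_le_find d.reverse w
      omega
    have hb := find_add_len_le d.reverse w h0
    simp only [List.length_reverse] at hb
    rw [if_neg h, if_neg (by omega), if_neg h]
    ring

-- the 2n buckets, in index order, are A's two diagonal families in A's order
theorem map_diag_split (puzzle : List (List String)) (n : Nat) (F : List Char → Int) :
    (List.range (2 * n)).map (fun x => F (diagOf puzzle n x))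
      = (List.range n).map (fun i => F (dCells puzzle n i))
        ++ (PySem.List.pyRange (n : Int) 0 (-1)).map (fun i => F (uCells puzzle n i.toNat)) := by
  rw [two_mul, List.range_add, List.map_append, List.map_map, pyRange_down, List.map_map]
  congr 1
  · apply List.map_congr_left
    intro x hx
    simp only [List.mem_range] at hx
    unfold diagOf
    rw [if_pos hx]
  · apply List.map_congr_left
    intro k hk
    simp only [List.mem_range] at hk
    simp only [Function.comp_apply]
    unfold diagOf
    rw [if_neg (by omega)]
    have e1 : 2 * n - (n + k) = n - k := by omega
    have e2 : ((n : Int) - (k : Int)).toNat = n - k := by omega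
    rw [e1, e2]

-- ===== VERDICT (by name: the statement is the Claim_ definition above) =====
theorem word_find_diagonal1_spec : Claim_equal_word_find_diagonal1 := by
  intro puzzle word _ _
  unfold Spec_word_find_diagonal1 word_find_diagonal1 word_find_diagonal1_alt
  simp only [buckets_eq, foldl_pair_append, rowStr1_eq, rowStr2_eq, match_string_eq_find,
    List.map_append, List.map_map, List.nil_append, Function.comp_def]
  refine Prod.ext ?_ ?_
  · exact (map_diag_split puzzle _ (fun d => PySem.Chars.find d word.toList)).symm
  · rw [List.map_congr_left
      (fun x _ => rfind_rev' ((puzzle.getD 0 []).getD 0 "").toList.length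
        (diagOf puzzle ((puzzle.getD 0 []).getD 0 "").toList.length x) word.toList)]
    exact (map_diag_split puzzle _
      (fun d => if PySem.Chars.find d.reverse word.toList = -1
        then PySem.Chars.find d.reverse word.toList
        else (((puzzle.getD 0 []).getD 0 "").toList.length : Int) - 1
          - PySem.Chars.find d.reverse word.toList)).symm
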